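-- pv_equiv track=rewrite | github.com/aviswerdlow/k4 | archive/07_TOOLS/fork_f/f3_short_words_analysis.py | find_consecutive_words
-- ===== SOURCE A (Python) =====
-- from typing import List, Tuple, Dict, Set, Optional
--
-- def find_consecutive_words(words: List[Tuple[int, str]]) -> List[str]:
--     """Find consecutive word sequences."""
--     sequences = []
--
--     i = 0
--     while i < len(words):
--         seq = [words[i][1]]
--         pos = words[i][0] + len(words[i][1])
--
--         j = i + 1
--         while j < len(words):
--             if words[j][0] == pos:
--                 seq.append(words[j][1])
--                 pos = words[j][0] + len(words[j][1])
--                 j += 1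
--             else:
--                 break
--
--         if len(seq) >= 2:
--             sequences.append(' '.join(seq))
--
--         i = j if j > i + 1 else i + 1
--
--     return sequences
-- ===== SOURCE B (Python) =====
-- from typing import List, Tuple
--
-- def find_consecutive_words(words: List[Tuple[int, str]]) -> List[str]:
--     """Find consecutive word sequences (flat pass with flush-on-break)."""
--     sequences = []
--     seq = []
--     pos = 0
--     for p, w in words:
--         if seq and p == pos:
--             seq.append(w)
--         else:
--             if len(seq) >= 2:
--                 sequences.append(' '.join(seq))
--             seq = [w]
--         pos = p + len(w)
--     if len(seq) >= 2:
--         sequences.append(' '.join(seq))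
--     return sequences
-- ===== Notes on version B (the rewrite author's own statement) =====
-- stated objective: idiomatic
-- what changed: Replaced the nested while-loops with index jumping by a single flat for-loop that keeps a current run and flushes it on position breaks.
import Mathlib
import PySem

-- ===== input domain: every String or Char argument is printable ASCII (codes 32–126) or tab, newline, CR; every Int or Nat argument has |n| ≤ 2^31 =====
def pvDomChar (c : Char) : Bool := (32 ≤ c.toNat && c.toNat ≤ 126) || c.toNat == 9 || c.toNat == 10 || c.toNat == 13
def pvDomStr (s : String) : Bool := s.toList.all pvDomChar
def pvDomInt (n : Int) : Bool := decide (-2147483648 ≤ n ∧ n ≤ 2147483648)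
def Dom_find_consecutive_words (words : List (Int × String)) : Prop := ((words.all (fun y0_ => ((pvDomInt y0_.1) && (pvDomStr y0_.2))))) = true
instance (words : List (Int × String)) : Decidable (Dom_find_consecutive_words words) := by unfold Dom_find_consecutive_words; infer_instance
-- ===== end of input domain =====

-- B replaces A's nested while-loops with a single flat pass that flushes the current run on position breaks (idiomatic, same O(n) cost).


-- ===== PORT A =====
def fcwExtend (pos : Int) (seq : List String) : List (Int × String) → List String × List (Int × String)
  | [] => (seq, [])
  | (p, w) :: t =>
    if p = pos then fcwExtend (p + PySem.Str.len w) (seq ++ [w]) t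
    else (seq, (p, w) :: t)

lemma fcwExtend_len : ∀ (rest : List (Int × String)) (pos : Int) (seq : List String),
    (fcwExtend pos seq rest).2.length ≤ rest.length := by
  intro rest
  induction rest with
  | nil => intro pos seq; simp [fcwExtend]
  | cons hd t ih =>
    intro pos seq
    obtain ⟨p, w⟩ := hd
    simp only [fcwExtend]
    split
    · exact Nat.le_trans (ih _ _) (Nat.le_succ _)
    · simp

-- outer while-loop of A: seq/pos/inner-while via fcwExtend, then i jumps to j
def fcwGoA (sequences : List String) : List (Int × String) → List String
  | [] => sequences
  | (p, w) :: rest =>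
    let r := fcwExtend (p + PySem.Str.len w) [w] rest
    fcwGoA (if 2 ≤ r.1.length then sequences ++ [PySem.Str.join " " r.1] else sequences) r.2
termination_by ws => ws.length
decreasing_by
  exact Nat.lt_succ_of_le (fcwExtend_len rest _ _)

def find_consecutive_words (words : List (Int × String)) : List String :=
  fcwGoA [] words

-- ===== PORT B =====
def fcwGoB (sequences seq : List String) (pos : Int) : List (Int × String) → List String
  | [] => if 2 ≤ seq.length then sequences ++ [PySem.Str.join " " seq] else sequences
  | (p, w) :: t =>
    if seq ≠ [] ∧ p = pos then
      fcwGoB sequences (seq ++ [w]) (p + PySem.Str.len w) t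
    else
      fcwGoB (if 2 ≤ seq.length then sequences ++ [PySem.Str.join " " seq] else sequences)
        [w] (p + PySem.Str.len w) t

def find_consecutive_words_alt (words : List (Int × String)) : List String :=
  fcwGoB [] [] 0 words

-- ===== PRECONDITION & SPEC =====
def Spec_find_consecutive_words (words : List (Int × String)) (out : List String) : Prop := out = find_consecutive_words_alt words
instance (words : List (Int × String)) (out : List String) : Decidable (Spec_find_consecutive_words words out) := by unfold Spec_find_consecutive_words; infer_instance

-- ===== CLAIM (what is proved, stated in full; the proofs are below) =====
def Claim_equal_find_consecutive_words : Prop := ∀ (words : List (Int × String)), Dom_find_consecutive_words words → Spec_find_consecutive_words words (find_consecutive_words words)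

-- ===== LEMMAS AND PROOFS =====

-- ===== VERDICT (by name: the statement is the Claim_ definition above) =====
lemma fcwGoB_eq_extend : ∀ (rest : List (Int × String)) (sequences seq : List String) (pos : Int),
    seq ≠ [] →
    fcwGoB sequences seq pos rest =
      fcwGoA (if 2 ≤ (fcwExtend pos seq rest).1.length
              then sequences ++ [PySem.Str.join " " (fcwExtend pos seq rest).1]
              else sequences)
        (fcwExtend pos seq rest).2 := by
  intro rest
  induction rest with
  | nil =>
    intro sequences seq pos _
    simp [fcwGoB, fcwExtend, fcwGoA]
  | cons hd t ih =>
    intro sequences seq pos hseq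
    obtain ⟨p, w⟩ := hd
    by_cases hp : p = pos
    · simp only [fcwGoB, fcwExtend, hseq, hp, ne_eq, not_false_eq_true, true_and,
        if_true]
      exact ih _ _ _ (by simp)
    · have h1 : ¬ (seq ≠ [] ∧ p = pos) := by tauto
      simp only [fcwGoB, fcwExtend, h1, if_neg hp, if_false]
      rw [ih _ _ _ (by simp)]
      conv_rhs => rw [fcwGoA]

theorem find_consecutive_words_spec : Claim_equal_find_consecutive_words := by
  intro words _
  unfold Spec_find_consecutive_words find_consecutive_words find_consecutive_words_alt
  cases words with
  | nil => simp [fcwGoA, fcwGoB]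
  | cons hd t =>
    obtain ⟨p, w⟩ := hd
    have h1 : ¬ (([] : List String) ≠ [] ∧ p = (0 : Int)) := by simp
    simp only [fcwGoB, h1, if_false, List.length_nil]
    rw [fcwGoB_eq_extend t _ _ _ (by simp)]
    conv_lhs => rw [fcwGoA]
    simp
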